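-- pv_equiv track=rewrite | github.com/MrBrantCode/unitest_baseline | mut_generate/mist_train_taco/taco_17294/solution.py | count_valid_pairs
-- ===== SOURCE A (Python) =====
-- def count_valid_pairs(A):
--     def nc2(n):
--         if n < 2:
--             return 0
--         return n * (n - 1) // 2
--
--     ones = twos = zeros = 0
--     for i in A:
--         if i == 1:
--             ones += 1
--         elif i == 2:
--             twos += 1
--         elif i == 0:
--             zeros += 1
--
--     n = len(A)
--     tot = nc2(n)
--     onepairs = nc2(ones)
--     onecombos = (n - ones) * ones
--     zeropairs = nc2(zeros)
--     zerocombos = (n - zeros - ones) * zeros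
--     twopairs = nc2(twos)
--
--     return tot - (onepairs + onecombos + twopairs + zeropairs + zerocombos)
-- ===== SOURCE B (Python) =====
-- def count_valid_pairs(A):
--     twos = others = 0
--     for i in A:
--         if i == 2:
--             twos += 1
--         elif i != 0 and i != 1:
--             others += 1
--     return others * (others - 1) // 2 + others * twos
-- ===== Notes on version B (the rewrite author's own statement) =====
-- stated objective: simpler
-- what changed: Replaced A's complement accounting (count ones/twos/zeros, total C(n,2) minus six invalid-pair terms) by direct counting: one pass counting twos and 'other' elements, returning C(others,2) + others*twos.
import Mathlib
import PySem

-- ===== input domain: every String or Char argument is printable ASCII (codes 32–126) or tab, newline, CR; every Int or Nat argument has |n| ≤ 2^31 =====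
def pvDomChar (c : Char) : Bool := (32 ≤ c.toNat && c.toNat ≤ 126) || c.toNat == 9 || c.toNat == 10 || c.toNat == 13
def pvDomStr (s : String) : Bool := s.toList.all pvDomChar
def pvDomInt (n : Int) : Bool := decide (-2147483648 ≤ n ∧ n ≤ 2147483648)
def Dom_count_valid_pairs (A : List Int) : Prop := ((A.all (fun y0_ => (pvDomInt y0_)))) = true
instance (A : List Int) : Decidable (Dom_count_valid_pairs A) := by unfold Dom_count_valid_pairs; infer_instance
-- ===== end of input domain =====

-- B replaces A's "total pairs minus invalid combinations" accounting (four counters, six nc2/product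
-- terms) by direct counting: one pass counting twos and others, then C(others,2) + others*twos. Objective: simpler.

-- ===== PORT A =====
-- A's inner helper nc2
def pvNc2 (n : Int) : Int := if n < 2 then 0 else PySem.Int.floordiv (n * (n - 1)) 2

-- A's loop body (the three elif counters)
def pvStepA (acc : Int × Int × Int) (i : Int) : Int × Int × Int :=
  if i == 1 then (acc.1 + 1, acc.2.1, acc.2.2)
  else if i == 2 then (acc.1, acc.2.1 + 1, acc.2.2)
  else if i == 0 then (acc.1, acc.2.1, acc.2.2 + 1)
  else acc

def count_valid_pairs (A : List Int) : Int :=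
  let s := A.foldl pvStepA (0, 0, 0)
  let ones := s.1
  let twos := s.2.1
  let zeros := s.2.2
  let n : Int := (A.length : Int)
  let tot := pvNc2 n
  let onepairs := pvNc2 ones
  let onecombos := (n - ones) * ones
  let zeropairs := pvNc2 zeros
  let zerocombos := (n - zeros - ones) * zeros
  let twopairs := pvNc2 twos
  tot - (onepairs + onecombos + twopairs + zeropairs + zerocombos)

-- ===== PORT B =====
-- B's loop body (count twos and the elements that are none of 0,1,2)
def pvStepB (acc : Int × Int) (i : Int) : Int × Int :=
  if i == 2 then (acc.1 + 1, acc.2)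
  else if i != 0 && i != 1 then (acc.1, acc.2 + 1)
  else acc

def count_valid_pairs_alt (A : List Int) : Int :=
  let s := A.foldl pvStepB (0, 0)
  PySem.Int.floordiv (s.2 * (s.2 - 1)) 2 + s.2 * s.1

-- ===== PRECONDITION & SPEC =====
def Spec_count_valid_pairs (A : List Int) (out : Int) : Prop := out = count_valid_pairs_alt A
instance (A : List Int) (out : Int) : Decidable (Spec_count_valid_pairs A out) := by unfold Spec_count_valid_pairs; infer_instance

-- ===== CLAIM (what is proved, stated in full; the proofs are below) =====
def Claim_equal_count_valid_pairs : Prop := ∀ (A : List Int), Dom_count_valid_pairs A → Spec_count_valid_pairs A (count_valid_pairs A)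

-- ===== LEMMAS AND PROOFS =====

-- A's fold computes the three counts
theorem foldA_eq (A : List Int) (o t z : Int) :
    A.foldl pvStepA (o, t, z)
    = (o + (A.countP (fun i => i == 1) : Int),
       t + (A.countP (fun i => i != 1 && i == 2) : Int),
       z + (A.countP (fun i => i != 1 && i != 2 && i == 0) : Int)) := by
  induction A generalizing o t z with
  | nil => simp
  | cons a A ih =>
    rw [List.foldl_cons]
    by_cases h1 : a = 1
    · rw [show pvStepA (o, t, z) a = (o + 1, t, z) by simp [pvStepA, h1]]
      rw [ih]; simp [List.countP_cons, h1, Prod.ext_iff]; push_cast; omega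
    · by_cases h2 : a = 2
      · rw [show pvStepA (o, t, z) a = (o, t + 1, z) by simp [pvStepA, h1, h2]]
        rw [ih]; simp [List.countP_cons, h1, h2, Prod.ext_iff]; push_cast; omega
      · by_cases h0 : a = 0
        · rw [show pvStepA (o, t, z) a = (o, t, z + 1) by simp [pvStepA, h1, h2, h0]]
          rw [ih]; simp [List.countP_cons, h1, h2, h0, Prod.ext_iff]; push_cast; omega
        · rw [show pvStepA (o, t, z) a = (o, t, z) by simp [pvStepA, h1, h2, h0]]
          rw [ih]; simp [List.countP_cons, h1, h2, h0]

-- B's fold computes twos and others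
theorem foldB_eq (A : List Int) (t m : Int) :
    A.foldl pvStepB (t, m)
    = (t + (A.countP (fun i => i == 2) : Int),
       m + (A.countP (fun i => i != 2 && i != 0 && i != 1) : Int)) := by
  induction A generalizing t m with
  | nil => simp
  | cons a A ih =>
    rw [List.foldl_cons]
    by_cases h2 : a = 2
    · rw [show pvStepB (t, m) a = (t + 1, m) by simp [pvStepB, h2]]
      rw [ih]; simp [List.countP_cons, h2, Prod.ext_iff]; push_cast; omega
    · by_cases h0 : a = 0
      · rw [show pvStepB (t, m) a = (t, m) by simp [pvStepB, h2, h0]]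
        rw [ih]; simp [List.countP_cons, h2, h0]
      · by_cases h1 : a = 1
        · rw [show pvStepB (t, m) a = (t, m) by simp [pvStepB, h2, h0, h1]]
          rw [ih]; simp [List.countP_cons, h2, h0, h1]
        · rw [show pvStepB (t, m) a = (t, m + 1) by simp [pvStepB, h2, h0, h1]]
          rw [ih]; simp [List.countP_cons, h2, h0, h1, Prod.ext_iff]; push_cast; omega

theorem counts_partition (A : List Int) :
    A.countP (fun i => i == 1) + A.countP (fun i => i != 1 && i == 2)
      + A.countP (fun i => i != 1 && i != 2 && i == 0)
      + A.countP (fun i => i != 2 && i != 0 && i != 1) = A.length := by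
  induction A with
  | nil => simp
  | cons a A ih =>
    simp only [List.countP_cons, List.length_cons]
    by_cases h1 : a = 1 <;> by_cases h2 : a = 2 <;> by_cases h0 : a = 0 <;>
      simp [h0, h1, h2] <;> omega

-- x*(x-1) is always even, so the floor division by 2 is exact
theorem fd2 (x : Int) : 2 * PySem.Int.floordiv (x * (x - 1)) 2 = x * (x - 1) := by
  rw [PySem.Int.floordiv_eq_ediv_of_pos (by norm_num)]
  have hdvd : (2 : Int) ∣ x * (x - 1) := by
    have := Int.even_mul_succ_self (x - 1)
    rw [show x - 1 + 1 = x by ring] at this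
    rcases this with ⟨k, hk⟩
    exact ⟨k, by linarith⟩
  exact Int.mul_ediv_cancel' hdvd

theorem nc2_two_mul (x : Int) (hx : 0 ≤ x) : 2 * pvNc2 x = x * (x - 1) := by
  unfold pvNc2
  split_ifs with h
  · have : x = 0 ∨ x = 1 := by omega
    rcases this with h' | h' <;> subst h' <;> ring
  · exact fd2 x

-- ===== VERDICT (by name: the statement is the Claim_ definition above) =====
theorem count_valid_pairs_spec : Claim_equal_count_valid_pairs := by
  intro A _
  show count_valid_pairs A = count_valid_pairs_alt A
  unfold count_valid_pairs count_valid_pairs_alt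
  rw [foldA_eq, foldB_eq]
  simp only [zero_add]
  have hpart := counts_partition A
  have hteq : A.countP (fun i => i == 2) = A.countP (fun i => i != 1 && i == 2) := by
    apply List.countP_congr; intro x _
    by_cases h : x = 2 <;> simp [h]
  rw [hteq, ← hpart]
  set o := A.countP (fun i => i == 1)
  set t := A.countP (fun i => i != 1 && i == 2)
  set z := A.countP (fun i => i != 1 && i != 2 && i == 0)
  set m := A.countP (fun i => i != 2 && i != 0 && i != 1)
  have hcast : ((o + t + z + m : Nat) : Int) = (o : Int) + t + z + m := by push_cast; ring
  rw [hcast]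
  apply mul_left_cancel₀ (a := (2 : Int)) two_ne_zero
  have hN := nc2_two_mul ((o : Int) + t + z + m) (by positivity)
  have hO := nc2_two_mul (o : Int) (by positivity)
  have hT := nc2_two_mul (t : Int) (by positivity)
  have hZ := nc2_two_mul (z : Int) (by positivity)
  have hM := fd2 (m : Int)
  linear_combination hN - hO - hT - hZ - hM
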